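-- pv_equiv track=rewrite | github.com/gregoryneal/ocrbot | ocrbot.py | lettersOnlyFilter
-- ===== SOURCE A (Python) =====
-- def lettersOnlyFilter(text):
-- 	'''
-- 	removes all non alphabetic characters
-- 	'''
-- 	#get each line of text
-- 	lines = text.split("\n") #something like [pretext multiple words, text multi words line 1, text multi words line 2, etc... , post text]
-- 	newLines = []
--
-- 	#iterate through the lines
-- 	for line in lines: # line = 'pretext multiple words' etc... goal: create newLine =
-- 		#get each word
-- 		words = line.split(' ') #something like [pretext, multiple, words,]
-- 		newWords = []
-- 		for word in words: # 'pretext' etc...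
-- 			newWord = ''.join(c for c in word if c.isalpha())
-- 			newWords.append(newWord)
--
-- 		newLines.append(' '.join(newWords))
--
-- 	#recompose it back into a reddit comment and print some data
-- 	text = "\n".join(newLines)
-- 	return text
-- ===== SOURCE B (Python) =====
-- def lettersOnlyFilter(text):
-- 	'''
-- 	removes all non alphabetic characters
-- 	'''
-- 	# one flat pass: keep letters, newlines and spaces, drop everything else
-- 	return ''.join(c for c in text if c.isalpha() or c == '\n' or c == ' ')
-- ===== Notes on version B (the rewrite author's own statement) =====
-- stated objective: simpler
-- what changed: Replaced the nested split-on-newline / split-on-space / per-word filter / double rejoin with a single flat character filter keeping letters, spaces and newlines.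
import Mathlib
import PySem

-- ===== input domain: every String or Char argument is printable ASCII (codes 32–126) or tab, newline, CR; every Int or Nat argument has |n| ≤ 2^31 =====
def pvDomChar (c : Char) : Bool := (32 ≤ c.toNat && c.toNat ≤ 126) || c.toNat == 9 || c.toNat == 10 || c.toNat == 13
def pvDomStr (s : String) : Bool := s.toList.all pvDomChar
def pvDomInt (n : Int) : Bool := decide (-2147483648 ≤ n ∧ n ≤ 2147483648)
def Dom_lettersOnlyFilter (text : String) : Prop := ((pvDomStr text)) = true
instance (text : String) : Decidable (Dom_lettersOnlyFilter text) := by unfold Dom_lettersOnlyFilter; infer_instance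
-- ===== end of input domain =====

-- B replaces A's nested split-on-'\n'/split-on-' '/per-word-filter/rejoin with one flat character filter (simpler).

-- ===== PORT A =====
def lettersOnlyFilter (text : String) : String :=
  let lines := PySem.Chars.splitOn text.toList ['\n']
  let newLines := lines.foldl (fun acc line =>
    let words := PySem.Chars.splitOn line [' ']
    let newWords := words.foldl (fun acc2 word =>
        acc2 ++ [word.filter PySem.Chars.isalpha]) []
    acc ++ [PySem.Chars.join [' '] newWords]) []
  String.ofList (PySem.Chars.join ['\n'] newLines)

-- ===== PORT B =====
def lettersOnlyFilter_alt (text : String) : String :=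
  String.ofList (text.toList.filter (fun c => PySem.Chars.isalpha c || c == '\n' || c == ' '))

-- ===== PRECONDITION & SPEC =====
def Spec_lettersOnlyFilter (text : String) (out : String) : Prop := out = lettersOnlyFilter_alt text
instance (text : String) (out : String) : Decidable (Spec_lettersOnlyFilter text out) := by unfold Spec_lettersOnlyFilter; infer_instance

-- ===== CLAIM (what is proved, stated in full; the proofs are below) =====
def Claim_equal_lettersOnlyFilter : Prop := ∀ (text : String), Dom_lettersOnlyFilter text → Spec_lettersOnlyFilter text (lettersOnlyFilter text)

-- ===== LEMMAS AND PROOFS =====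

-- simple recursive characterisation of splitOn for a single-char separator
def pvSplitAux (d : Char) : List Char → List Char → List (List Char)
  | [], cur => [cur.reverse]
  | c :: rest, cur => if d = c then cur.reverse :: pvSplitAux d rest [] else pvSplitAux d rest (c :: cur)

theorem pvGo_eq (d : Char) : ∀ (cs : List Char) (fuel : Nat) (cur : List Char) (acc : List (List Char)),
    cs.length < fuel →
    PySem.Chars.splitOn.go [d] fuel cs cur acc = acc.reverse ++ pvSplitAux d cs cur := by
  intro cs
  induction cs with
  | nil =>
    intro fuel cur acc h
    obtain ⟨f, rfl⟩ := Nat.exists_eq_succ_of_ne_zero (by omega : fuel ≠ 0)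
    simp [PySem.Chars.splitOn.go, pvSplitAux]
  | cons c rest ih =>
    intro fuel cur acc h
    obtain ⟨f, rfl⟩ := Nat.exists_eq_succ_of_ne_zero (by omega : fuel ≠ 0)
    show (if List.isPrefixOf [d] (c :: rest) then
            PySem.Chars.splitOn.go [d] f (List.drop 1 (c :: rest)) [] (cur.reverse :: acc)
          else PySem.Chars.splitOn.go [d] f rest (c :: cur) acc) = _
    simp only [List.isPrefixOf, List.drop_one, List.tail_cons]
    by_cases hdc : d = c
    · subst hdc
      rw [if_pos (by simp)]
      rw [ih f [] (cur.reverse :: acc) (by simpa using h)]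
      simp [pvSplitAux]
    · rw [if_neg (by simp [hdc]), ih f (c :: cur) acc (by simpa using h)]
      simp [pvSplitAux, hdc]

theorem pvSplitOn_eq (d : Char) (cs : List Char) :
    PySem.Chars.splitOn cs [d] = pvSplitAux d cs [] := by
  show PySem.Chars.splitOn.go [d] (cs.length + 1) cs [] [] = _
  rw [pvGo_eq d cs (cs.length + 1) [] [] (by omega)]
  rfl

theorem pvSplitAux_ne_nil (d : Char) (cs cur : List Char) : pvSplitAux d cs cur ≠ [] := by
  induction cs generalizing cur with
  | nil => simp [pvSplitAux]
  | cons c rest ih => simp only [pvSplitAux]; split <;> simp [ih]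

-- splitting on d, filtering each piece with p (where p d = false), and rejoining with d
-- is one flat filter keeping p-chars and d
theorem pvJoinSplit (d : Char) (p : Char → Bool) (hp : p d = false) :
    ∀ (cs cur : List Char),
    PySem.Chars.join [d] ((pvSplitAux d cs cur).map (List.filter p)) =
      cur.reverse.filter p ++ cs.filter (fun c => p c || c == d) := by
  intro cs
  induction cs with
  | nil =>
    intro cur
    simp [pvSplitAux, PySem.Chars.join, List.intercalate]
  | cons c rest ih =>
    intro cur
    by_cases hdc : d = c
    · subst hdc
      simp only [pvSplitAux, if_true, List.map_cons]
      obtain ⟨w, ws, hw⟩ := List.exists_cons_of_ne_nil (pvSplitAux_ne_nil d rest [])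
      have hjoin : PySem.Chars.join [d] ((cur.reverse.filter p) :: (pvSplitAux d rest []).map (List.filter p))
          = cur.reverse.filter p ++ d :: PySem.Chars.join [d] ((pvSplitAux d rest []).map (List.filter p)) := by
        rw [hw]
        simp [PySem.Chars.join, List.intercalate]
      rw [hjoin, ih []]
      simp [hp]
    · simp only [pvSplitAux, if_neg hdc]
      rw [ih (c :: cur)]
      have hcd : (c == d) = false := by
        simp only [beq_eq_false_iff_ne]
        exact fun h => hdc h.symm
      cases hpc : p c <;>
        simp [List.filter_append, hcd, hpc]

-- the inner loop of A: split a line on spaces, keep letters in each word, rejoin with spaces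
theorem pvInner (line : List Char) :
    PySem.Chars.join [' '] ((PySem.Chars.splitOn line [' ']).map (List.filter PySem.Chars.isalpha)) =
      line.filter (fun c => PySem.Chars.isalpha c || c == ' ') := by
  rw [pvSplitOn_eq, pvJoinSplit ' ' PySem.Chars.isalpha (by decide) line []]
  rfl

-- ===== VERDICT (by name: the statement is the Claim_ definition above) =====
theorem lettersOnlyFilter_spec : Claim_equal_lettersOnlyFilter := by
  intro text _
  show lettersOnlyFilter text = lettersOnlyFilter_alt text
  unfold lettersOnlyFilter lettersOnlyFilter_alt
  simp only [PySem.List.foldl_append_singleton_eq_map]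
  simp only [List.nil_append, pvInner]
  rw [pvSplitOn_eq, pvJoinSplit '\n' (fun c => PySem.Chars.isalpha c || c == ' ') (by decide) text.toList []]
  simp only [List.reverse_nil, List.filter_nil, List.nil_append]
  congr 1
  apply List.filter_congr
  intro c _
  cases h : PySem.Chars.isalpha c <;> cases h2 : (c == '\n') <;> simp_all
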